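-- pv_equiv track=rewrite | github.com/jenjungjj/CS111 | ps3/ps3pr4.py | jscore
-- ===== SOURCE A (Python) =====
-- def rem_first(elem, values):
--     """ removes the first occurrence of elem from the list values
--     """
--     if values == '':
--         return ''
--     elif values[0] == elem:
--         return values[1:]
--     else:
--         result_rest = rem_first(elem, values[1:])
--         return values[0] + result_rest
--
-- def jscore(s1, s2):
--     """ returns the number of shared characters in inputs s1 and s2
--         input s1 and s2 are strings
--     """
--     if s1 == '' or s2 == '':
--         return 0
--     else:
--         removed = jscore(s1[1:], rem_first(s1[0], s2))
--         if s1[0] in s2: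
--             return 1 + removed
--         else:
--             return removed
-- ===== SOURCE B (Python) =====
-- def jscore(s1, s2):
--     """ returns the number of shared characters in inputs s1 and s2
--         input s1 and s2 are strings
--     """
--     f1 = {}
--     for ch in s1:
--         f1[ch] = f1.get(ch, 0) + 1
--     f2 = {}
--     for ch in s2:
--         f2[ch] = f2.get(ch, 0) + 1
--     total = 0
--     for ch, n in f1.items():
--         if ch in f2:
--             total += min(n, f2[ch])
--     return total
-- ===== Notes on version B (the rewrite author's own statement) =====
-- stated objective: faster
-- what changed: replaces the quadratic recursion with per-character first-occurrence removal by two single-pass frequency tables and one sum of min(freq1[ch], freq2[ch]) over shared characters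
import Mathlib
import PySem

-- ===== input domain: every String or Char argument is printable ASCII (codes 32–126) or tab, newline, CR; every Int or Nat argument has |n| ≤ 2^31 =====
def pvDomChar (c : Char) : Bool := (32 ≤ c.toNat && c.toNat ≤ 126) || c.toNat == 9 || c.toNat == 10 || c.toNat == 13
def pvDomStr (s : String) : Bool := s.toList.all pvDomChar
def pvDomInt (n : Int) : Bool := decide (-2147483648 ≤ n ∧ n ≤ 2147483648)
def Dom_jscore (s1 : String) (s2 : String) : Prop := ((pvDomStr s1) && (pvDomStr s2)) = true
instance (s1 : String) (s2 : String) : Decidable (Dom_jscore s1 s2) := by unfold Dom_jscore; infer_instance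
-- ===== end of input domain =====

-- B replaces A's quadratic recursive first-occurrence removal by two frequency tables and a sum of min counts (asymptotically faster).


-- ===== PORT A =====
-- rem_first: removes the first occurrence of elem from values (strings as char lists)
def remFirst (elem : Char) : List Char → List Char
  | [] => []
  | v :: rest => if v = elem then rest else v :: remFirst elem rest

-- jscore's recursion on the characters of s1
def jscoreChars : List Char → List Char → Int
  | [], _ => 0
  | c :: t, s2 =>
    if s2 = [] then 0
    else
      let removed := jscoreChars t (remFirst c s2)
      if c ∈ s2 then 1 + removed else removed

def jscore (s1 : String) (s2 : String) : Int := jscoreChars s1.toList s2.toList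

-- ===== PORT B =====
-- the f1/f2-building loops of Source B: d[ch] = d.get(ch, 0) + 1
def freqTable (l : List Char) : PySem.Dict Char Int :=
  l.foldl (fun d c => d.insert c (d.getD c 0 + 1)) PySem.Dict.empty

def jscore_alt (s1 : String) (s2 : String) : Int :=
  let f1 := freqTable s1.toList
  let f2 := freqTable s2.toList
  f1.items.foldl (fun total p => if f2.contains p.1 then total + min p.2 (f2.getD p.1 0) else total) 0

-- ===== PRECONDITION & SPEC =====
def Spec_jscore (s1 : String) (s2 : String) (out : Int) : Prop := out = jscore_alt s1 s2
instance (s1 : String) (s2 : String) (out : Int) : Decidable (Spec_jscore s1 s2 out) := by unfold Spec_jscore; infer_instance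

-- ===== CLAIM (what is proved, stated in full; the proofs are below) =====
def Claim_equal_jscore : Prop := ∀ (s1 : String) (s2 : String), Dom_jscore s1 s2 → Spec_jscore s1 s2 (jscore s1 s2)

-- ===== LEMMAS AND PROOFS =====

-- A's rem_first is List.erase
theorem remFirst_eq_erase (c : Char) (l : List Char) : remFirst c l = l.erase c := by
  induction l with
  | nil => rfl
  | cons v rest ih =>
    simp only [remFirst, List.erase_cons, ih]
    by_cases h : v = c <;> simp [h]

-- A computes the cardinality of the multiset intersection
theorem jscoreChars_eq_card (l1 l2 : List Char) :
    jscoreChars l1 l2 = (((l1 : Multiset Char) ∩ (l2 : Multiset Char)).card : Int) := by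
  induction l1 generalizing l2 with
  | nil => simp [jscoreChars]
  | cons c t ih =>
    by_cases h2 : l2 = []
    · subst h2; simp [jscoreChars]
    · by_cases hc : c ∈ l2
      · have : ((c :: t : List Char) : Multiset Char) ∩ (l2 : Multiset Char)
            = c ::ₘ ((t : Multiset Char) ∩ ((l2 : List Char).erase c : List Char)) := by
          rw [← Multiset.cons_coe, Multiset.cons_inter_of_pos _ hc, ← Multiset.coe_erase]
        simp [jscoreChars, h2, hc, this, ih, remFirst_eq_erase]
        ring
      · have : ((c :: t : List Char) : Multiset Char) ∩ (l2 : Multiset Char)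
            = (t : Multiset Char) ∩ (l2 : Multiset Char) := by
          rw [← Multiset.cons_coe, Multiset.cons_inter_of_neg _ hc]
        simp [jscoreChars, h2, hc, this, ih, remFirst_eq_erase,
          List.erase_of_not_mem hc]

-- nat-valued summand of B's final loop
def minShared (l1 l2 : List Char) (c : Char) : Nat :=
  if c ∈ l2 then min (l1.count c) (l2.count c) else 0

theorem sum_minShared_eq_card (l1 l2 : List Char) :
    ((PySem.Set.ofList l1).map (minShared l1 l2)).sum
      = ((l1 : Multiset Char) ∩ (l2 : Multiset Char)).card := by
  rw [← List.sum_toFinset _ (PySem.Set.nodup_ofList l1)]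
  have hfs : (PySem.Set.ofList l1).toFinset = l1.toFinset := by
    ext a; simp [PySem.Set.mem_ofList]
  rw [hfs]
  have h1 : ∑ a ∈ l1.toFinset, minShared l1 l2 a
      = ∑ a ∈ l1.toFinset, Multiset.count a ((l1 : Multiset Char) ∩ (l2 : Multiset Char)) := by
    refine Finset.sum_congr rfl (fun a _ => ?_)
    rw [Multiset.count_inter]
    simp only [Multiset.coe_count, minShared]
    by_cases h : a ∈ l2
    · simp [h]
    · simp [h, List.count_eq_zero_of_not_mem h]
  rw [h1, ← Multiset.toFinset_sum_count_eq]
  refine (Finset.sum_subset ?_ ?_).symm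
  · intro a ha
    simp only [Multiset.mem_toFinset, Multiset.mem_inter, Multiset.mem_coe] at ha
    simp [ha.1]
  · intro a _ ha
    simp only [Multiset.mem_toFinset] at ha
    exact Multiset.count_eq_zero.mpr ha

-- B's loop computes the same sum
theorem jscore_alt_eq (s1 s2 : String) :
    jscore_alt s1 s2 = (((PySem.Set.ofList s1.toList).map (minShared s1.toList s2.toList)).sum : Int) := by
  unfold jscore_alt freqTable
  dsimp only
  rw [PySem.Dict.foldl_insert_getD_add_one_eq_counter, PySem.Dict.foldl_insert_getD_add_one_eq_counter,
      PySem.Dict.items_counter]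
  have hfun : (fun (total : Int) (p : Char × Int) =>
        if (PySem.Dict.counter s2.toList).contains p.1 then total + min p.2 ((PySem.Dict.counter s2.toList).getD p.1 0) else total)
      = fun total p => total + (if (PySem.Dict.counter s2.toList).contains p.1 then min p.2 ((PySem.Dict.counter s2.toList).getD p.1 0) else 0) := by
    funext total p; split <;> simp
  rw [hfun, PySem.List.foldl_add, List.map_map, Nat.cast_list_sum, List.map_map]
  rw [zero_add]
  congr 1
  refine List.map_congr_left (fun c hc => ?_)
  simp only [Function.comp_apply, PySem.Dict.contains_counter, PySem.Dict.getD_counter, minShared]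
  by_cases h : c ∈ s2.toList
  · simp [h]
  · simp [h]

-- ===== VERDICT (by name: the statement is the Claim_ definition above) =====
theorem jscore_spec : Claim_equal_jscore := by
  intro s1 s2 _
  unfold Spec_jscore jscore
  rw [jscoreChars_eq_card, jscore_alt_eq, sum_minShared_eq_card]
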